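-- pv_equiv track=rewrite | github.com/donglam1824/Project2 | waypoint_gpt.py | lawnmower_path_planning_with_obstacle_avoidance
-- ===== SOURCE A (Python) =====
-- directions_4 = [(-1, 0), (1, 0), (0, -1), (0, 1)]
--
-- def lawnmower_path_planning_with_obstacle_avoidance(map_data, start):
--     rows, cols = len(map_data), len(map_data[0])
--     waypoints = []
--
--     def is_valid(cell):
--         x, y = cell
--         return 0 <= x < rows and 0 <= y < cols and map_data[x][y] != '1'
--
--     def find_alternative_path(current, target):
--         # Use BFS to find a valid path avoiding obstacles
--         queue = [(current, [current])]
--         visited = set()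
--         visited.add(current)
--         while queue:
--             (x, y), path = queue.pop(0)
--             if (x, y) == target:
--                 return path
--             for dx, dy in directions_4:
--                 nx, ny = x + dx, y + dy
--                 if is_valid((nx, ny)) and (nx, ny) not in visited:
--                     visited.add((nx, ny))
--                     queue.append(((nx, ny), path + [(nx, ny)]))
--         return []
--
--     # Start lawnmower pattern
--     direction = 1  # 1 for right, -1 for left
--     for i in range(rows):
--         for j in range(cols) if direction == 1 else range(cols - 1, -1, -1):
--             if is_valid((i, j)):
--                 if waypoints and waypoints[-1] != (i, j):
--                     # Find alternative path if there's a gap due to obstacles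
--                     alternative_path = find_alternative_path(waypoints[-1], (i, j))
--                     waypoints.extend(alternative_path[1:])  # Skip the current position
--                 waypoints.append((i, j))
--
--                 # Stop if the bottom-right corner is reached
--                 if (i, j) == (rows - 1, cols - 1):
--                     return waypoints
--         direction *= -1  # Switch direction for the next row
--
--     return waypoints
-- ===== SOURCE B (Python) =====
-- from collections import deque
--
-- directions_4 = [(-1, 0), (1, 0), (0, -1), (0, 1)]
--
-- def lawnmower_path_planning_with_obstacle_avoidance(map_data, start):
--     rows, cols = len(map_data), len(map_data[0])
--
--     def is_valid(cell):
--         x, y = cell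
--         return 0 <= x < rows and 0 <= y < cols and map_data[x][y] != '1'
--
--     def bfs_path(source, target):
--         # BFS with a deque and parent pointers; the path is rebuilt once, at the target.
--         parents = {source: None}
--         queue = deque([source])
--         while queue:
--             cur = queue.popleft()
--             if cur == target:
--                 path = []
--                 while cur is not None:
--                     path.append(cur)
--                     cur = parents[cur]
--                 return path[::-1]
--             x, y = cur
--             news = [(x + dx, y + dy) for dx, dy in directions_4
--                     if is_valid((x + dx, y + dy)) and (x + dx, y + dy) not in parents]
--             for n in news:
--                 parents[n] = cur
--             queue.extend(news)
--         return []
--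
--     # Stage 1: the serpentine visiting order of the free cells, cut at the bottom-right corner.
--     order = []
--     for i in range(rows):
--         row = [(i, j) for j in range(cols) if is_valid((i, j))]
--         order.extend(row if i % 2 == 0 else row[::-1])
--     corner = (rows - 1, cols - 1)
--     if corner in order:
--         order = order[:order.index(corner) + 1]
--
--     # Stage 2: stitch consecutive cells of the order with BFS detours.
--     waypoints = []
--     for cell in order:
--         if waypoints and waypoints[-1] != cell:
--             waypoints.extend(bfs_path(waypoints[-1], cell)[1:])
--         waypoints.append(cell)
--     return waypoints
-- ===== Notes on version B (the rewrite author's own statement) =====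
-- stated objective: alternative
-- what changed: B stages the sweep (build the serpentine order of free cells, truncate it at the bottom-right corner, then stitch consecutive cells) instead of A's interleaved double loop with an early return, and its gap-filling BFS uses a deque with parent pointers and one path reconstruction at the target instead of list.pop(0) on a queue carrying a fresh copy of the whole path per enqueued cell.
import Mathlib
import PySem

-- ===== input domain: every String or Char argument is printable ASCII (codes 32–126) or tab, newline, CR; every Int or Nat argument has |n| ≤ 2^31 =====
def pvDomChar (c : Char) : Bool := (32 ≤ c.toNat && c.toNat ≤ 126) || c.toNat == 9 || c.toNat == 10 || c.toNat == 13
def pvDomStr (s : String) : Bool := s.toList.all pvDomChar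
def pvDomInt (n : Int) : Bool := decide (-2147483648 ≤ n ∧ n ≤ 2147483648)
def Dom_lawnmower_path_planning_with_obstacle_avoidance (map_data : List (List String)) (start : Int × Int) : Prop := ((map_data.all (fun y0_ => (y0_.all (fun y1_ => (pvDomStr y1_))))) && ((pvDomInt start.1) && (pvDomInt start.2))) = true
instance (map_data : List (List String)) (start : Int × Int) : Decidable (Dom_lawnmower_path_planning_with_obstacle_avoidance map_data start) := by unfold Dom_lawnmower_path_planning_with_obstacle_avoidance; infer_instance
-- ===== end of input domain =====

-- B restructures A in two ways: the gap-filling BFS keeps a parent-pointer dict (path rebuilt once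
-- at the target) instead of copying the whole path into the queue at every enqueue, and the sweep is
-- staged — first build the serpentine order of free cells and truncate it at the bottom-right corner,
-- then stitch consecutive cells with BFS detours — instead of stitching inside the double sweep loop
-- with an early return (objective: alternative). Return-value equivalence; neither mutates its input.

-- directions_4 = [(-1, 0), (1, 0), (0, -1), (0, 1)]
def pvDirs : List (Int × Int) := [(-1, 0), (1, 0), (0, -1), (0, 1)]

-- map_data[x][y], total stand-in: exact whenever 0 ≤ x < rows, 0 ≤ y < cols and Pre_ holds
-- (then both indices are in range, so pyGet? is some); used by both Pythons' identical is_valid.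
def pvCell (m : List (List String)) (x y : Int) : String :=
  ((PySem.List.pyGet? m x).bind (fun r => PySem.List.pyGet? r y)).getD "1"

-- is_valid(cell) — the same helper in A and in B
def pvIsValid (m : List (List String)) (rows cols : Int) (c : Int × Int) : Bool :=
  decide (0 ≤ c.1 ∧ c.1 < rows ∧ 0 ≤ c.2 ∧ c.2 < cols) && (pvCell m c.1 c.2 != "1")

-- ===== PORT A =====
-- A's BFS: queue of (cell, full path copy), visited set; one fuel step per pop (fuel
-- rows*cols+1 ≥ 1 + #possible enqueues, so the 0-fuel branch is unreachable in A's semantics).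
def pvBfsA (m : List (List String)) (rows cols : Int) (target : Int × Int) :
    Nat → List ((Int × Int) × List (Int × Int)) → PySem.Set (Int × Int) → List (Int × Int)
  | 0, _, _ => []
  | _ + 1, [], _ => []
  | fuel + 1, (c, path) :: rest, visited =>
    if c = target then path
    else
      let st := pvDirs.foldl
        (fun (qv : List ((Int × Int) × List (Int × Int)) × PySem.Set (Int × Int)) d =>
          let n := (c.1 + d.1, c.2 + d.2)
          if pvIsValid m rows cols n && !(PySem.Set.contains qv.2 n) then
            (qv.1 ++ [(n, path ++ [n])], PySem.Set.add qv.2 n)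
          else qv) (rest, visited)
      pvBfsA m rows cols target fuel st.1 st.2

-- find_alternative_path(current, target)
def pvFindAlt (m : List (List String)) (rows cols : Int) (cur target : Int × Int) : List (Int × Int) :=
  pvBfsA m rows cols target ((rows * cols).toNat + 1) [(cur, [cur])] (PySem.Set.add PySem.Set.empty cur)

-- the inner 'for j in …' loop; Bool = the early 'return waypoints' at the bottom-right corner
def pvColsA (m : List (List String)) (rows cols i : Int) :
    List Int → List (Int × Int) → List (Int × Int) × Bool
  | [], wps => (wps, false)
  | j :: js, wps =>
    if pvIsValid m rows cols (i, j) then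
      let wps1 := match wps.getLast? with          -- 'if waypoints and waypoints[-1] != (i, j)'
        | some last => if last ≠ (i, j) then wps ++ (pvFindAlt m rows cols last (i, j)).drop 1 else wps
        | none => wps                               -- alternative_path[1:] is drop 1 (exact)
      let wps2 := wps1 ++ [(i, j)]
      if (i, j) = (rows - 1, cols - 1) then (wps2, true) else pvColsA m rows cols i js wps2
    else pvColsA m rows cols i js wps

-- the outer 'for i in range(rows)' loop with the direction flag
def pvRowsA (m : List (List String)) (rows cols : Int) :
    List Int → Int → List (Int × Int) → List (Int × Int)
  | [], _, wps => wps
  | i :: is, dir, wps =>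
    let js := if dir = 1 then PySem.List.pyRange 0 cols 1 else PySem.List.pyRange (cols - 1) (-1) (-1)
    match pvColsA m rows cols i js wps with
    | (wps', true) => wps'
    | (wps', false) => pvRowsA m rows cols is (dir * -1) wps'

def lawnmower_path_planning_with_obstacle_avoidance (map_data : List (List String)) (start : Int × Int) : List (Int × Int) :=
  let rows : Int := map_data.length
  let cols : Int := ((PySem.List.pyGet? map_data 0).getD []).length   -- len(map_data[0]); IndexError (map_data = []) excluded by Pre_
  pvRowsA map_data rows cols (PySem.List.pyRange 0 rows 1) 1 []

-- ===== PORT B =====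
-- the comprehension over directions_4: the four neighbours that are free and not yet in parents
def pvNews (m : List (List String)) (rows cols : Int)
    (parents : PySem.Dict (Int × Int) (Option (Int × Int))) (c : Int × Int) : List (Int × Int) :=
  (pvDirs.map (fun d => (c.1 + d.1, c.2 + d.2))).filter
    (fun n => pvIsValid m rows cols n && !(PySem.Dict.contains parents n))

-- 'for n in news: parents[n] = cur'
def pvBatch (parents : PySem.Dict (Int × Int) (Option (Int × Int))) (c : Int × Int)
    (news : List (Int × Int)) : PySem.Dict (Int × Int) (Option (Int × Int)) :=
  news.foldl (fun p n => p.insert n (some c)) parents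

-- 'while cur is not None: path.append(cur); cur = parents[cur]' then path[::-1]; fuel
-- len(parents)+1 bounds the chain (parent chains are acyclic); getD none stands for the
-- KeyError lookup, unreachable while walking a chain stored in parents.
def pvRebuild (parents : PySem.Dict (Int × Int) (Option (Int × Int))) :
    Nat → Option (Int × Int) → List (Int × Int) → List (Int × Int)
  | _, none, acc => acc.reverse
  | 0, some _, acc => acc.reverse
  | f + 1, some c, acc => pvRebuild parents f (PySem.Dict.getD parents c none) (acc ++ [c])

-- B's BFS: deque of cells (popleft = head, extend = append at the end), parent-pointer dict
def pvBfsB (m : List (List String)) (rows cols : Int) (target : Int × Int) :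
    Nat → List (Int × Int) → PySem.Dict (Int × Int) (Option (Int × Int)) → List (Int × Int)
  | 0, _, _ => []
  | _ + 1, [], _ => []
  | fuel + 1, c :: rest, parents =>
    if c = target then pvRebuild parents (parents.items.length + 1) (some c) []
    else
      let news := pvNews m rows cols parents c
      pvBfsB m rows cols target fuel (rest ++ news) (pvBatch parents c news)

-- bfs_path(source, target)
def pvBfsPath (m : List (List String)) (rows cols : Int) (src target : Int × Int) : List (Int × Int) :=
  pvBfsB m rows cols target ((rows * cols).toNat + 1) [src] (PySem.Dict.insert PySem.Dict.empty src none)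

-- stage 1: the serpentine visiting order of the free cells
def pvOrder (m : List (List String)) (rows cols : Int) : List (Int × Int) :=
  (PySem.List.pyRange 0 rows 1).foldl (fun order i =>
    let row := ((PySem.List.pyRange 0 cols 1).filter (fun j => pvIsValid m rows cols (i, j))).map
      (fun j => (i, j))
    order ++ (if PySem.Int.mod i 2 = 0 then row else row.reverse)) []

-- stage 2: stitch consecutive cells of the order with BFS detours
def pvStitch (m : List (List String)) (rows cols : Int)
    (wps cells : List (Int × Int)) : List (Int × Int) :=
  cells.foldl (fun wps cell =>
    (match wps.getLast? with
     | some last => if last ≠ cell then wps ++ (pvBfsPath m rows cols last cell).drop 1 else wps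
     | none => wps) ++ [cell]) wps

def lawnmower_path_planning_with_obstacle_avoidance_alt (map_data : List (List String)) (start : Int × Int) : List (Int × Int) :=
  let rows : Int := map_data.length
  let cols : Int := ((PySem.List.pyGet? map_data 0).getD []).length
  let order := pvOrder map_data rows cols
  let order2 := match PySem.List.index? order (rows - 1, cols - 1) with   -- 'if corner in order: order[:index+1]'
    | some k => order.take (k + 1)
    | none => order
  pvStitch map_data rows cols [] order2

-- ===== PRECONDITION & SPEC =====
-- Pre_ excludes exactly the inputs on which A raises IndexError: an empty map (len(map_data[0]))
-- and maps with a row shorter than the first row (is_valid indexes every j < cols of every row reached).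
def Pre_lawnmower_path_planning_with_obstacle_avoidance (map_data : List (List String)) (start : Int × Int) : Prop :=
  map_data ≠ [] ∧ ∀ row ∈ map_data, map_data.headI.length ≤ row.length
instance (map_data : List (List String)) (start : Int × Int) : Decidable (Pre_lawnmower_path_planning_with_obstacle_avoidance map_data start) := by unfold Pre_lawnmower_path_planning_with_obstacle_avoidance; infer_instance

def pvWitness_lawnmower_path_planning_with_obstacle_avoidance : List (List String) × (Int × Int) :=
  ([["0", "1", "0"], ["0", "1", "0"], ["0", "0", "0"]], (0, 0))

def Spec_lawnmower_path_planning_with_obstacle_avoidance (map_data : List (List String)) (start : Int × Int) (out : List (Int × Int)) : Prop := out = lawnmower_path_planning_with_obstacle_avoidance_alt map_data start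
instance (map_data : List (List String)) (start : Int × Int) (out : List (Int × Int)) : Decidable (Spec_lawnmower_path_planning_with_obstacle_avoidance map_data start out) := by unfold Spec_lawnmower_path_planning_with_obstacle_avoidance; infer_instance

-- ===== CLAIM (what is proved, stated in full; the proofs are below) =====
def Claim_equal_lawnmower_path_planning_with_obstacle_avoidance : Prop := ∀ (map_data : List (List String)) (start : Int × Int), Dom_lawnmower_path_planning_with_obstacle_avoidance map_data start → Pre_lawnmower_path_planning_with_obstacle_avoidance map_data start → Spec_lawnmower_path_planning_with_obstacle_avoidance map_data start (lawnmower_path_planning_with_obstacle_avoidance map_data start)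

-- ===== LEMMAS AND PROOFS =====

theorem pvDictNC {p : PySem.Dict (Int × Int) (Option (Int × Int))} {k : Int × Int}
    (h : k ∉ p.keys) : p.contains k = false := by
  cases hc : p.contains k
  · rfl
  · exact absurd ((PySem.Dict.contains_iff_mem_keys _ _).1 hc) h

theorem pvSetNC {s : PySem.Set (Int × Int)} {x : Int × Int}
    (h : x ∉ s) : PySem.Set.contains s x = false := by
  cases hc : PySem.Set.contains s x
  · rfl
  · exact absurd ((PySem.Set.contains_iff _ _).1 hc) h

theorem pvContains_eq (p : PySem.Dict (Int × Int) (Option (Int × Int))) (n : Int × Int) :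
    PySem.Set.contains p.keys n = p.contains n := by
  by_cases hmem : n ∈ p.keys
  · rw [(PySem.Set.contains_iff _ _).2 hmem, (PySem.Dict.contains_iff_mem_keys _ _).2 hmem]
  · rw [pvSetNC hmem, pvDictNC hmem]

theorem pvSetContains_append {vis : PySem.Set (Int × Int)} {n x : Int × Int} (hx : x ≠ n) :
    PySem.Set.contains (vis ++ [n]) x = PySem.Set.contains vis x := by
  by_cases hmem : x ∈ vis
  · rw [(PySem.Set.contains_iff _ _).2 (List.mem_append_left _ hmem),
        (PySem.Set.contains_iff _ _).2 hmem]
  · rw [pvSetNC hmem, pvSetNC (by simp [hx, hmem])]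

-- the four neighbour cells of c are pairwise distinct
theorem pvNbrNodup (c : Int × Int) : (pvDirs.map (fun d => (c.1 + d.1, c.2 + d.2))).Nodup := by
  simp [pvDirs, Prod.ext_iff]

-- 'pvChain p c l' : l is the source-to-c path spelled out by the parent pointers in p.
inductive pvChain (p : PySem.Dict (Int × Int) (Option (Int × Int))) : (Int × Int) → List (Int × Int) → Prop
  | base {c} : p.get? c = some none → pvChain p c [c]
  | step {c c' q} : p.get? c = some (some c') → pvChain p c' q → pvChain p c (q ++ [c])

theorem pvChain_mem_keys {p : PySem.Dict (Int × Int) (Option (Int × Int))} {c : Int × Int}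
    {l : List (Int × Int)} (h : pvChain p c l) : ∀ z ∈ l, z ∈ p.keys := by
  induction h with
  | base hg =>
    intro z hz; simp at hz; subst hz
    by_contra hk
    rw [(PySem.Dict.get?_eq_none_iff_not_mem_keys _ _).2 hk] at hg; cases hg
  | step hg _ ih =>
    intro z hz
    rcases List.mem_append.1 hz with h1 | h2
    · exact ih z h1
    · simp at h2; subst h2
      by_contra hk
      rw [(PySem.Dict.get?_eq_none_iff_not_mem_keys _ _).2 hk] at hg; cases hg

theorem pvChain_insert {p : PySem.Dict (Int × Int) (Option (Int × Int))} {c k : Int × Int}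
    {v : Option (Int × Int)} {l : List (Int × Int)}
    (h : pvChain p c l) (hk : k ∉ p.keys) : pvChain (p.insert k v) c l := by
  induction h with
  | @base c0 hg =>
    have hne : c0 ≠ k := fun he => hk (he ▸ pvChain_mem_keys (pvChain.base hg) c0 (by simp))
    exact pvChain.base (by rw [PySem.Dict.get?_insert_of_ne _ _ hne]; exact hg)
  | @step c0 c' q hg hc ih =>
    have hne : c0 ≠ k := fun he => by
      apply hk; rw [← he]
      by_contra hk0
      rw [(PySem.Dict.get?_eq_none_iff_not_mem_keys _ _).2 hk0] at hg; cases hg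
    exact pvChain.step (by rw [PySem.Dict.get?_insert_of_ne _ _ hne]; exact hg) ih

theorem pvRebuild_chain {p : PySem.Dict (Int × Int) (Option (Int × Int))} {c : Int × Int}
    {l : List (Int × Int)} (h : pvChain p c l) :
    ∀ (f : Nat) (acc : List (Int × Int)), l.length ≤ f →
      pvRebuild p f (some c) acc = l ++ acc.reverse := by
  induction h with
  | @base c0 hg =>
    intro f acc hf
    match f, hf with
    | g + 1, _ =>
      rw [pvRebuild, PySem.Dict.getD_eq_get?_getD, hg]
      simp [pvRebuild]
  | @step c0 c' q hg hc ih =>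
    intro f acc hf
    match f, (by simpa using hf : q.length + 1 ≤ f) with
    | g + 1, hg' =>
      rw [pvRebuild, PySem.Dict.getD_eq_get?_getD, hg]
      show pvRebuild p g (some c') (acc ++ [c0]) = (q ++ [c0]) ++ acc.reverse
      rw [ih g (acc ++ [c0]) (by omega)]
      simp

-- pvBatch over fresh distinct keys: keys append, lookups
theorem pvBatch_keys (c : Int × Int) : ∀ (L : List (Int × Int))
    (p : PySem.Dict (Int × Int) (Option (Int × Int))),
    (∀ n ∈ L, n ∉ p.keys) → L.Nodup → (pvBatch p c L).keys = p.keys ++ L := by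
  intro L
  induction L with
  | nil => intro p _ _; simp [pvBatch]
  | cons n L ih =>
    intro p hf hnd
    have hkeys : (p.insert n (some c)).keys = p.keys ++ [n] :=
      PySem.Dict.keys_insert_of_not_contains _ _ (pvDictNC (hf n (by simp)))
    have := ih (p.insert n (some c))
      (by
        intro x hx
        rw [hkeys]
        simp only [List.mem_append, List.mem_singleton]
        rintro (h1 | h2)
        · exact hf x (by simp [hx]) h1
        · subst h2; exact (List.nodup_cons.1 hnd).1 hx)
      (List.nodup_cons.1 hnd).2
    show (pvBatch (p.insert n (some c)) c L).keys = p.keys ++ n :: L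
    rw [this, hkeys]
    simp

theorem pvBatch_get?_not (c : Int × Int) : ∀ (L : List (Int × Int))
    (p : PySem.Dict (Int × Int) (Option (Int × Int))) (k : Int × Int), k ∉ L →
    (pvBatch p c L).get? k = p.get? k := by
  intro L
  induction L with
  | nil => intro p k _; rfl
  | cons n L ih =>
    intro p k hk
    show (pvBatch (p.insert n (some c)) c L).get? k = p.get? k
    rw [ih _ _ (fun h => hk (by simp [h])),
        PySem.Dict.get?_insert_of_ne _ _ (fun h => hk (by simp [h]))]

theorem pvBatch_get?_mem (c : Int × Int) : ∀ (L : List (Int × Int))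
    (p : PySem.Dict (Int × Int) (Option (Int × Int))), L.Nodup →
    ∀ k ∈ L, (pvBatch p c L).get? k = some (some c) := by
  intro L
  induction L with
  | nil => intro p _ k hk; cases hk
  | cons n L ih =>
    intro p hnd k hk
    rcases List.mem_cons.1 hk with h1 | h2
    · subst h1
      show (pvBatch (p.insert k (some c)) c L).get? k = some (some c)
      rw [pvBatch_get?_not c L _ k (List.nodup_cons.1 hnd).1, PySem.Dict.get?_insert_self]
    · exact ih (p.insert n (some c)) (List.nodup_cons.1 hnd).2 k h2

theorem pvBatch_chain (c : Int × Int) : ∀ (L : List (Int × Int))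
    (p : PySem.Dict (Int × Int) (Option (Int × Int))) {c0 : Int × Int} {l : List (Int × Int)},
    pvChain p c0 l → (∀ n ∈ L, n ∉ p.keys) → L.Nodup → pvChain (pvBatch p c L) c0 l := by
  intro L
  induction L with
  | nil => intro p c0 l h _ _; exact h
  | cons n L ih =>
    intro p c0 l h hf hnd
    have hkeys : (p.insert n (some c)).keys = p.keys ++ [n] :=
      PySem.Dict.keys_insert_of_not_contains _ _ (pvDictNC (hf n (by simp)))
    exact ih (p.insert n (some c)) (pvChain_insert h (hf n (by simp)))
      (by
        intro x hx
        rw [hkeys]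
        simp only [List.mem_append, List.mem_singleton]
        rintro (h1 | h2)
        · exact hf x (by simp [hx]) h1
        · subst h2; exact (List.nodup_cons.1 hnd).1 hx)
      (List.nodup_cons.1 hnd).2

-- the invariant tying A's BFS state to B's
def pvInv (parents : PySem.Dict (Int × Int) (Option (Int × Int)))
    (qA : List ((Int × Int) × List (Int × Int))) : Prop :=
  ∀ cp ∈ qA, pvChain parents cp.1 cp.2 ∧ cp.2.Nodup

-- closed form of A's enqueue fold: appends (filtered against the INITIAL visited) in order
theorem pvFoldA_char (m : List (List String)) (rows cols : Int) (c : Int × Int)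
    (path : List (Int × Int)) :
    ∀ (ds : List (Int × Int)) (q : List ((Int × Int) × List (Int × Int)))
      (vis : PySem.Set (Int × Int)),
      (ds.map (fun d => (c.1 + d.1, c.2 + d.2))).Nodup →
      (ds.foldl
        (fun (qv : List ((Int × Int) × List (Int × Int)) × PySem.Set (Int × Int)) d =>
          let n := (c.1 + d.1, c.2 + d.2)
          if pvIsValid m rows cols n && !(PySem.Set.contains qv.2 n) then
            (qv.1 ++ [(n, path ++ [n])], PySem.Set.add qv.2 n)
          else qv) (q, vis))
      = (q ++ ((ds.map (fun d => (c.1 + d.1, c.2 + d.2))).filter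
            (fun n => pvIsValid m rows cols n && !(PySem.Set.contains vis n))).map
            (fun n => (n, path ++ [n])),
         vis ++ (ds.map (fun d => (c.1 + d.1, c.2 + d.2))).filter
            (fun n => pvIsValid m rows cols n && !(PySem.Set.contains vis n))) := by
  intro ds
  induction ds with
  | nil => intro q vis _; simp
  | cons d ds ih =>
    intro q vis hnd
    simp only [List.map_cons, List.nodup_cons] at hnd
    obtain ⟨hn_notin, hnd'⟩ := hnd
    simp only [List.foldl_cons, List.map_cons, List.filter_cons]
    by_cases hg : (pvIsValid m rows cols (c.1 + d.1, c.2 + d.2)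
        && !(PySem.Set.contains vis (c.1 + d.1, c.2 + d.2))) = true
    · have hnc : PySem.Set.contains vis (c.1 + d.1, c.2 + d.2) = false := by
        simp only [Bool.and_eq_true, Bool.not_eq_true'] at hg
        exact hg.2
      have hadd : PySem.Set.add vis (c.1 + d.1, c.2 + d.2) = vis ++ [(c.1 + d.1, c.2 + d.2)] := by
        unfold PySem.Set.add
        rw [hnc]
        simp
      simp only [hg, if_true]
      rw [hadd, ih _ _ hnd']
      have hfil : (ds.map (fun d' => (c.1 + d'.1, c.2 + d'.2))).filter
            (fun n => pvIsValid m rows cols n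
              && !(PySem.Set.contains (vis ++ [(c.1 + d.1, c.2 + d.2)]) n))
          = (ds.map (fun d' => (c.1 + d'.1, c.2 + d'.2))).filter
            (fun n => pvIsValid m rows cols n && !(PySem.Set.contains vis n)) := by
        apply List.filter_congr
        intro x hx
        rw [pvSetContains_append (by rintro rfl; exact hn_notin hx)]
      rw [hfil]
      simp
    · simp only [Bool.not_eq_true] at hg
      simp only [hg, if_neg Bool.false_ne_true]
      exact ih q vis hnd'

theorem pvBfs_eq (m : List (List String)) (rows cols : Int) (target : Int × Int) :
    ∀ (fuel : Nat) (qA : List ((Int × Int) × List (Int × Int)))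
      (parents : PySem.Dict (Int × Int) (Option (Int × Int))),
      parents.keys.Nodup → pvInv parents qA →
      pvBfsA m rows cols target fuel qA parents.keys
        = pvBfsB m rows cols target fuel (qA.map (·.1)) parents := by
  intro fuel
  induction fuel with
  | zero => intro qA parents _ _; rfl
  | succ fuel ih =>
    intro qA parents hnd hinv
    match qA with
    | [] => rfl
    | (c, path) :: rest =>
      rcases hinv (c, path) (by simp) with ⟨hch0, hpn0⟩
      have hch : pvChain parents c path := hch0
      have hpn : path.Nodup := hpn0
      by_cases hct : c = target
      · subst hct
        simp only [pvBfsA, pvBfsB, List.map_cons]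
        have hlen : path.length ≤ parents.items.length + 1 := by
          have hsub : path ⊆ parents.keys := fun z hz => pvChain_mem_keys hch z hz
          have hle := (List.Nodup.subperm hpn hsub).length_le
          have hkl : parents.keys.length = parents.items.length := by
            simp [PySem.Dict.keys]
          omega
        rw [pvRebuild_chain hch _ [] hlen]
        simp
      · -- both pop c and enqueue the same fresh neighbours
        have hchar := pvFoldA_char m rows cols c path pvDirs rest parents.keys (pvNbrNodup c)
        have hnews : (pvDirs.map (fun d => (c.1 + d.1, c.2 + d.2))).filter
              (fun n => pvIsValid m rows cols n && !(PySem.Set.contains parents.keys n))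
            = pvNews m rows cols parents c := by
          unfold pvNews
          apply List.filter_congr
          intro x _
          rw [pvContains_eq]
        have hfresh : ∀ n ∈ pvNews m rows cols parents c, n ∉ parents.keys := by
          intro n hn hmem
          have h2 := List.of_mem_filter hn
          simp only [Bool.and_eq_true, Bool.not_eq_true'] at h2
          rw [(PySem.Dict.contains_iff_mem_keys _ _).2 hmem] at h2
          simp at h2
        have hnodup : (pvNews m rows cols parents c).Nodup :=
          List.Nodup.filter _ (pvNbrNodup c)
        have hbkeys : (pvBatch parents c (pvNews m rows cols parents c)).keys
            = parents.keys ++ pvNews m rows cols parents c :=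
          pvBatch_keys c _ parents hfresh hnodup
        have hndB : (pvBatch parents c (pvNews m rows cols parents c)).keys.Nodup := by
          rw [hbkeys]
          exact List.Nodup.append hnd hnodup (fun a ha hb => hfresh a hb ha)
        have hinvB : pvInv (pvBatch parents c (pvNews m rows cols parents c))
            (rest ++ (pvNews m rows cols parents c).map (fun n => (n, path ++ [n]))) := by
          intro cp hcp
          rcases List.mem_append.1 hcp with h1 | h2
          · rcases hinv cp (by simp [h1]) with ⟨hch2, hnd2⟩
            exact ⟨pvBatch_chain c _ parents hch2 hfresh hnodup, hnd2⟩
          · obtain ⟨w, hw, rfl⟩ := List.mem_map.1 h2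
            refine ⟨pvChain.step (pvBatch_get?_mem c _ parents hnodup w hw)
              (pvBatch_chain c _ parents hch hfresh hnodup), ?_⟩
            refine List.Nodup.append hpn (List.nodup_singleton _) ?_
            intro a ha hb
            rw [List.mem_singleton] at hb
            exact hfresh w hw (pvChain_mem_keys hch _ (by rwa [hb] at ha))
        have hIH := ih (rest ++ (pvNews m rows cols parents c).map (fun n => (n, path ++ [n])))
          (pvBatch parents c (pvNews m rows cols parents c)) hndB hinvB
        have hmapf : List.map ((fun x : (Int × Int) × List (Int × Int) => x.1) ∘
              (fun n : Int × Int => (n, path ++ [n]))) (pvNews m rows cols parents c)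
            = pvNews m rows cols parents c := by
          have hid : ((fun x : (Int × Int) × List (Int × Int) => x.1) ∘
              (fun n : Int × Int => (n, path ++ [n]))) = id := rfl
          rw [hid, List.map_id]
        simp only [pvBfsA, pvBfsB, List.map_cons, if_neg hct]
        rw [hchar, hnews, ← hbkeys, hIH, List.map_append, List.map_map, hmapf]

theorem pvFindAlt_eq (m : List (List String)) (rows cols : Int) (cur target : Int × Int) :
    pvFindAlt m rows cols cur target = pvBfsPath m rows cols cur target := by
  unfold pvFindAlt pvBfsPath
  have hkeys : (PySem.Dict.insert PySem.Dict.empty cur (none : Option (Int × Int))).keys = [cur] := by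
    rw [PySem.Dict.keys_insert_of_not_contains _ _ (PySem.Dict.contains_empty _)]
    simp [PySem.Dict.keys_empty]
  have hvis : PySem.Set.add PySem.Set.empty cur
      = (PySem.Dict.insert PySem.Dict.empty cur (none : Option (Int × Int))).keys := by
    rw [hkeys]; rfl
  rw [hvis]
  have := pvBfs_eq m rows cols target ((rows * cols).toNat + 1) [(cur, [cur])]
    (PySem.Dict.insert PySem.Dict.empty cur none)
    (by rw [hkeys]; exact List.nodup_singleton _)
    (by
      intro cp hcp; simp at hcp; subst hcp
      exact ⟨pvChain.base (PySem.Dict.get?_insert_self _ _ _), List.nodup_singleton _⟩)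
  simpa using this

-- ==== the sweep: A's interleaved double loop vs B's order-then-stitch ====

-- cut a list after the first occurrence of the corner (proof-side characterisation)
def pvCut (corner : Int × Int) : List (Int × Int) → List (Int × Int)
  | [] => []
  | x :: xs => if x = corner then [x] else x :: pvCut corner xs

theorem pvCut_of_not_mem {corner : Int × Int} : ∀ {l : List (Int × Int)},
    corner ∉ l → pvCut corner l = l := by
  intro l
  induction l with
  | nil => intro _; rfl
  | cons x xs ih =>
    intro h
    unfold pvCut
    rw [if_neg (fun he => h (by simp [he])), ih (fun he => h (by simp [he]))]

theorem pvCut_append (corner : Int × Int) : ∀ (xs ys : List (Int × Int)),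
    pvCut corner (xs ++ ys) = if corner ∈ xs then pvCut corner xs else xs ++ pvCut corner ys := by
  intro xs
  induction xs with
  | nil => intro ys; simp
  | cons x xs ih =>
    intro ys
    by_cases hx : x = corner
    · subst hx
      simp [pvCut]
    · simp only [List.cons_append, pvCut, if_neg hx, ih ys, List.mem_cons]
      by_cases hm : corner ∈ xs
      · rw [if_pos hm, if_pos (Or.inr hm)]
      · rw [if_neg hm, if_neg (by rintro (h | h); exact hx h.symm; exact hm h)]

-- B's index?+take truncation is exactly pvCut
theorem pvTrunc_eq_cut (corner : Int × Int) : ∀ (l : List (Int × Int)),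
    (match PySem.List.index? l corner with
     | some k => l.take (k + 1)
     | none => l) = pvCut corner l := by
  intro l
  induction l with
  | nil => simp [PySem.List.index?_eq_idxOf?, pvCut]
  | cons x xs ih =>
    by_cases hx : x = corner
    · subst hx
      rw [PySem.List.index?_cons_self]
      simp [pvCut]
    · rw [PySem.List.index?_cons_of_ne xs hx]
      cases hidx : PySem.List.index? xs corner with
      | none =>
        simp only [Option.map_none]
        rw [pvCut, if_neg hx,
          pvCut_of_not_mem ((PySem.List.index?_eq_none_iff _ _).1 hidx)]
      | some k =>
        simp only [Option.map_some]
        rw [pvCut, if_neg hx]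
        have := ih
        rw [hidx] at this
        simpa [List.take_succ_cons] using congrArg (List.cons x) this

theorem pvStitch_append (m : List (List String)) (rows cols : Int)
    (wps xs ys : List (Int × Int)) :
    pvStitch m rows cols wps (xs ++ ys) = pvStitch m rows cols (pvStitch m rows cols wps xs) ys := by
  simp [pvStitch, List.foldl_append]

-- one inner sweep of A = stitching the row's free cells, cut at the corner
theorem pvColsA_char (m : List (List String)) (rows cols i : Int) :
    ∀ (js : List Int) (wps : List (Int × Int)),
      pvColsA m rows cols i js wps =
        (pvStitch m rows cols wps (pvCut (rows - 1, cols - 1)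
            ((js.filter (fun j => pvIsValid m rows cols (i, j))).map (fun j => (i, j)))),
         decide ((rows - 1, cols - 1) ∈
            (js.filter (fun j => pvIsValid m rows cols (i, j))).map (fun j => ((i : Int), j)))) := by
  intro js
  induction js with
  | nil => intro wps; simp [pvColsA, pvStitch, pvCut]
  | cons j js ih =>
    intro wps
    by_cases hv : pvIsValid m rows cols (i, j) = true
    · simp only [pvColsA, hv, if_true, List.filter_cons, List.map_cons]
      by_cases hc : ((i : Int), j) = ((rows - 1 : Int), cols - 1)
      · rw [if_pos hc]
        simp only [pvCut, hc]
        simp [pvStitch, pvFindAlt_eq]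
      · rw [if_neg hc, ih]
        simp only [pvCut, if_neg hc]
        have hc' : ¬((rows - 1, cols - 1) = ((i : Int), j)) := fun h => hc h.symm
        refine Prod.ext ?_ ?_
        · simp [pvStitch, pvFindAlt_eq]
        · simp [hc']
    · simp only [Bool.not_eq_true] at hv
      simp only [pvColsA, if_neg Bool.false_ne_true, List.filter_cons, hv]
      exact ih wps

def pvRowCells (m : List (List String)) (rows cols i : Int) : List (Int × Int) :=
  let row := ((PySem.List.pyRange 0 cols 1).filter (fun j => pvIsValid m rows cols (i, j))).map
    (fun j => (i, j))
  if PySem.Int.mod i 2 = 0 then row else row.reverse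

theorem pvOrder_eq_flatMap (m : List (List String)) (rows cols : Int) :
    pvOrder m rows cols = (PySem.List.pyRange 0 rows 1).flatMap (pvRowCells m rows cols) := by
  unfold pvOrder pvRowCells
  rw [PySem.List.foldl_append_eq_flatMap]
  simp

-- A's row loop = stitching the cut serpentine order of the remaining rows
theorem pvRowsA_char (m : List (List String)) (rows cols : Int) :
    ∀ (n : Nat) (i : Int) (wps : List (Int × Int)), (rows - i).toNat = n → 0 ≤ i →
      pvRowsA m rows cols (PySem.List.pyRange i rows 1) (if i % 2 = 0 then 1 else -1) wps
        = pvStitch m rows cols wps (pvCut (rows - 1, cols - 1)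
            ((PySem.List.pyRange i rows 1).flatMap (pvRowCells m rows cols))) := by
  intro n
  induction n with
  | zero =>
    intro i wps hn _
    rw [PySem.List.pyRange_one_eq_nil (by omega)]
    simp [pvRowsA, pvStitch, pvCut]
  | succ n ih =>
    intro i wps hn hi
    have hlt : i < rows := by omega
    rw [PySem.List.pyRange_one_cons hlt]
    simp only [pvRowsA, List.flatMap_cons]
    have hmod : PySem.Int.mod i 2 = i % 2 := PySem.Int.mod_eq_emod_of_pos (by norm_num)
    have hcells : ((if (if i % 2 = 0 then (1 : Int) else -1) = 1 then PySem.List.pyRange 0 cols 1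
            else PySem.List.pyRange (cols - 1) (-1) (-1)).filter
              (fun j => pvIsValid m rows cols (i, j))).map (fun j => ((i : Int), j))
        = pvRowCells m rows cols i := by
      unfold pvRowCells
      rw [hmod]
      by_cases h : i % 2 = 0
      · simp [h]
      · have h2 : ¬((if i % 2 = 0 then (1 : Int) else -1) = 1) := by simp [h]
        rw [if_neg h2, if_neg h]
        have h3 : PySem.List.pyRange (cols - 1) (-1) (-1)
            = (PySem.List.pyRange 0 cols 1).reverse := by
          rw [PySem.List.pyRange_neg_one_eq_reverse]
          norm_num
        rw [h3, List.filter_reverse, List.map_reverse]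
    rw [pvColsA_char, hcells, pvCut_append]
    by_cases hmem : ((rows - 1 : Int), (cols - 1 : Int)) ∈ pvRowCells m rows cols i
    · rw [decide_eq_true hmem, if_pos hmem]
    · rw [decide_eq_false hmem, if_neg hmem]
      show pvRowsA m rows cols (PySem.List.pyRange (i + 1) rows 1)
          ((if i % 2 = 0 then (1 : Int) else -1) * -1)
          (pvStitch m rows cols wps (pvCut (rows - 1, cols - 1) (pvRowCells m rows cols i)))
        = _
      have hflip : (if i % 2 = 0 then (1 : Int) else -1) * -1
          = (if (i + 1) % 2 = 0 then (1 : Int) else -1) := by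
        by_cases h : i % 2 = 0
        · rw [if_pos h, if_neg (by omega : ¬((i + 1) % 2 = 0))]; norm_num
        · rw [if_neg h, if_pos (by omega : (i + 1) % 2 = 0)]; norm_num
      rw [hflip, ih (i + 1) _ (by omega) (by omega)]
      rw [pvCut_of_not_mem hmem, pvStitch_append]

theorem pvMainGen (m : List (List String)) (rows cols : Int) :
    pvRowsA m rows cols (PySem.List.pyRange 0 rows 1) 1 []
      = pvStitch m rows cols []
          (match PySem.List.index? (pvOrder m rows cols) (rows - 1, cols - 1) with
           | some k => (pvOrder m rows cols).take (k + 1)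
           | none => pvOrder m rows cols) := by
  rw [pvTrunc_eq_cut, pvOrder_eq_flatMap]
  have h := pvRowsA_char m rows cols (rows - 0).toNat 0 [] rfl le_rfl
  norm_num at h
  exact h

-- ===== VERDICT (by name: the statement is the Claim_ definition above) =====
theorem lawnmower_path_planning_with_obstacle_avoidance_spec : Claim_equal_lawnmower_path_planning_with_obstacle_avoidance := by
  intro map_data start _ _
  unfold Spec_lawnmower_path_planning_with_obstacle_avoidance
  exact pvMainGen map_data (map_data.length : Int)
    (((PySem.List.pyGet? map_data 0).getD []).length : Int)
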